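-- pv_equiv track=rewrite | github.com/Nomehr/Beet_Root_HWs_PN | Pekach N. Lesson 19.py | in_range
-- ===== SOURCE A (Python) =====
-- from typing import Iterable, Iterator
--
-- def in_range(start: int, end: int, step: int = 1) -> Iterator[int]:
--     if step == 0:
--         raise ValueError("step argument must not be zero")
--
--     current = start
--     if step > 0:
--         while current < end:
--             yield current
--             current += step
--     else:
--         while current > end:
--             yield current
--             current += step
-- ===== SOURCE B (Python) =====
-- def in_range(start: int, end: int, step: int = 1):
--     if step == 0:
--         raise ValueError("step argument must not be zero")
--     count = max(0, -(-(end - start) // step))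
--     for i in range(count):
--         yield start + i * step
-- ===== Notes on version B (the rewrite author's own statement) =====
-- stated objective: alternative
-- what changed: Replaces the running-accumulator while-loops (one per step sign) by a single closed-form ceiling-division count followed by an index-based yield of start + i*step.
import Mathlib
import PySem

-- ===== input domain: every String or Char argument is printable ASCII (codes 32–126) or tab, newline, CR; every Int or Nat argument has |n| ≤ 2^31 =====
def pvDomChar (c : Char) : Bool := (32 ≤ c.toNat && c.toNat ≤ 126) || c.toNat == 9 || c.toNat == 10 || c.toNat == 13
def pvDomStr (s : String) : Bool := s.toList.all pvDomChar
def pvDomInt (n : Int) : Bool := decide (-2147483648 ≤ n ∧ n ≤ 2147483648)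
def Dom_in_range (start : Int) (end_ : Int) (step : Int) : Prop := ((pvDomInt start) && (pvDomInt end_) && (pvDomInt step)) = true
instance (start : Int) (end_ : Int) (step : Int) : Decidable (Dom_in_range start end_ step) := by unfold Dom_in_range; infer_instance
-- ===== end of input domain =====

-- B replaces A's two running-accumulator while-loops by a closed-form ceiling-division
-- element count plus an index-based yield; alternative decomposition, same cost.


-- ===== PORT A =====
-- 'while current < end: yield current; current += step'  (step > 0)
def in_range_up (end_ step : Int) (h : 0 < step) (current : Int) : List Int :=
  if current < end_ then current :: in_range_up end_ step h (current + step) else []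
termination_by (end_ - current).toNat
decreasing_by omega

-- 'while current > end: yield current; current += step'  (step < 0)
def in_range_down (end_ step : Int) (h : step < 0) (current : Int) : List Int :=
  if current > end_ then current :: in_range_down end_ step h (current + step) else []
termination_by (current - end_).toNat
decreasing_by omega

def in_range (start : Int) (end_ : Int) (step : Int) : List Int :=
  if h : 0 < step then in_range_up end_ step h start
  else if h' : step < 0 then in_range_down end_ step h' start
  else []  -- step = 0: Python raises ValueError; excluded by Pre_in_range

-- ===== PORT B =====
def in_range_alt (start : Int) (end_ : Int) (step : Int) : List Int :=
  let count : Int := max 0 (-(PySem.Int.floordiv (-(end_ - start)) step))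
  (List.range count.toNat).map (fun (i : Nat) => start + (i : Int) * step)

-- ===== PRECONDITION & SPEC =====
-- Pre_ excludes exactly step = 0, where the Python A (and B) raise ValueError.
def Pre_in_range (start : Int) (end_ : Int) (step : Int) : Prop := step ≠ 0
instance (start : Int) (end_ : Int) (step : Int) : Decidable (Pre_in_range start end_ step) := by unfold Pre_in_range; infer_instance

def pvWitness_in_range : Int × Int × Int := (1, 10, 2)

def Spec_in_range (start : Int) (end_ : Int) (step : Int) (out : List Int) : Prop := out = in_range_alt start end_ step
instance (start : Int) (end_ : Int) (step : Int) (out : List Int) : Decidable (Spec_in_range start end_ step out) := by unfold Spec_in_range; infer_instance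

-- ===== CLAIM (what is proved, stated in full; the proofs are below) =====
def Claim_equal_in_range : Prop := ∀ (start : Int) (end_ : Int) (step : Int), Dom_in_range start end_ step → Pre_in_range start end_ step → Spec_in_range start end_ step (in_range start end_ step)

-- ===== LEMMAS AND PROOFS =====

-- the closed-form count B computes
def pvCount (start end_ step : Int) : Int := -(PySem.Int.floordiv (-(end_ - start)) step)

lemma pvCount_up_pos {c end_ step : Int} (hs : 0 < step) (h : c < end_) :
    pvCount c end_ step = pvCount (c + step) end_ step + 1 := by
  have hq := (PySem.Int.neg_floordiv_neg_eq_iff_of_pos (a := end_ - (c + step)) (b := step)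
    (q := pvCount (c + step) end_ step) hs).mp rfl
  exact (PySem.Int.neg_floordiv_neg_eq_iff_of_pos (a := end_ - c) (b := step) hs).mpr
    ⟨by linarith [hq.1], by linarith [hq.2]⟩

lemma pvCount_up_nonpos {c end_ step : Int} (hs : 0 < step) (h : ¬ c < end_) :
    pvCount c end_ step ≤ 0 := by
  have hq := (PySem.Int.neg_floordiv_neg_eq_iff_of_pos (a := end_ - c) (b := step)
    (q := pvCount c end_ step) hs).mp rfl
  by_contra hc
  push_neg at hc
  nlinarith [hq.1]

lemma pvCount_down_pos {c end_ step : Int} (hs : step < 0) (h : end_ < c) :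
    pvCount c end_ step = pvCount (c + step) end_ step + 1 := by
  have hrw : ∀ x : Int, pvCount x end_ step = -(PySem.Int.floordiv (-(x - end_)) (-step)) := by
    intro x
    unfold pvCount
    rw [show -(end_ - x) = x - end_ by ring, ← PySem.Int.floordiv_neg_neg (x - end_) step]
  rw [hrw, hrw]
  have hs' : 0 < -step := by omega
  have hq := (PySem.Int.neg_floordiv_neg_eq_iff_of_pos (a := c + step - end_) (b := -step)
    (q := -(PySem.Int.floordiv (-(c + step - end_)) (-step))) hs').mp rfl
  exact (PySem.Int.neg_floordiv_neg_eq_iff_of_pos (a := c - end_) (b := -step) hs').mpr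
    ⟨by linarith [hq.1], by linarith [hq.2]⟩

lemma pvCount_down_nonpos {c end_ step : Int} (hs : step < 0) (h : ¬ end_ < c) :
    pvCount c end_ step ≤ 0 := by
  have hrw : pvCount c end_ step = -(PySem.Int.floordiv (-(c - end_)) (-step)) := by
    unfold pvCount
    rw [show -(end_ - c) = c - end_ by ring, ← PySem.Int.floordiv_neg_neg (c - end_) step]
  have hs' : 0 < -step := by omega
  have hq := (PySem.Int.neg_floordiv_neg_eq_iff_of_pos (a := c - end_) (b := -step)
    (q := -(PySem.Int.floordiv (-(c - end_)) (-step))) hs').mp rfl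
  rw [hrw]
  by_contra hc
  push_neg at hc
  nlinarith [hq.1]

lemma range_map_succ (n : Nat) (f : Nat → Int) :
    (List.range (n + 1)).map f = f 0 :: (List.range n).map (fun i => f (i + 1)) := by
  rw [List.range_succ_eq_map, List.map_cons, List.map_map]
  rfl

lemma in_range_up_eq (end_ step : Int) (h : 0 < step) (c : Int) :
    in_range_up end_ step h c
      = (List.range (pvCount c end_ step).toNat).map (fun (i : Nat) => c + (i : Int) * step) := by
  fun_induction in_range_up end_ step h c with
  | case1 c hlt ih =>
    have hcnt := pvCount_up_pos h hlt
    have hpos : 0 ≤ pvCount (c + step) end_ step := by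
      by_contra hneg
      push_neg at hneg
      have := pvCount_up_pos h hlt
      -- pvCount c = pvCount (c+step) + 1; but also pvCount c ≥ 1 since c < end_
      have hq := (PySem.Int.neg_floordiv_neg_eq_iff_of_pos (a := end_ - c) (b := step)
        (q := pvCount c end_ step) h).mp rfl
      nlinarith [hq.2]
    have htn : (pvCount c end_ step).toNat = (pvCount (c + step) end_ step).toNat + 1 := by
      omega
    rw [htn, range_map_succ, ih]
    congr 1
    · simp
    · apply List.map_congr_left
      intro i _
      push_cast
      ring
  | case2 c hlt =>
    have := pvCount_up_nonpos h hlt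
    have : (pvCount c end_ step).toNat = 0 := by omega
    simp [this]

lemma in_range_down_eq (end_ step : Int) (h : step < 0) (c : Int) :
    in_range_down end_ step h c
      = (List.range (pvCount c end_ step).toNat).map (fun (i : Nat) => c + (i : Int) * step) := by
  fun_induction in_range_down end_ step h c with
  | case1 c hlt ih =>
    have hcnt := pvCount_down_pos h hlt
    have hpos : 0 ≤ pvCount (c + step) end_ step := by
      by_contra hneg
      push_neg at hneg
      have hs' : 0 < -step := by omega
      have hrw : pvCount c end_ step = -(PySem.Int.floordiv (-(c - end_)) (-step)) := by
        unfold pvCount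
        rw [show -(end_ - c) = c - end_ by ring, ← PySem.Int.floordiv_neg_neg (c - end_) step]
      have hq := (PySem.Int.neg_floordiv_neg_eq_iff_of_pos (a := c - end_) (b := -step)
        (q := -(PySem.Int.floordiv (-(c - end_)) (-step))) hs').mp rfl
      rw [hrw] at hcnt
      nlinarith [hq.2]
    have htn : (pvCount c end_ step).toNat = (pvCount (c + step) end_ step).toNat + 1 := by
      omega
    rw [htn, range_map_succ, ih]
    congr 1
    · simp
    · apply List.map_congr_left
      intro i _
      push_cast
      ring
  | case2 c hlt =>
    have := pvCount_down_nonpos h hlt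
    have : (pvCount c end_ step).toNat = 0 := by omega
    simp [this]

lemma alt_eq_count (start end_ step : Int) :
    in_range_alt start end_ step
      = (List.range (pvCount start end_ step).toNat).map (fun (i : Nat) => start + (i : Int) * step) := by
  unfold in_range_alt pvCount
  have : (max 0 (-(PySem.Int.floordiv (-(end_ - start)) step))).toNat
       = (-(PySem.Int.floordiv (-(end_ - start)) step)).toNat := by omega
  simp only [this]

-- ===== VERDICT (by name: the statement is the Claim_ definition above) =====
theorem in_range_spec : Claim_equal_in_range := by
  intro start end_ step _ hpre
  unfold Spec_in_range in_range
  rw [alt_eq_count]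
  split
  · exact in_range_up_eq end_ step ‹_› start
  · split
    · exact in_range_down_eq end_ step ‹_› start
    · exact absurd (by omega : step = 0) hpre
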